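-- pv_equiv track=rewrite | github.com/Rigobertoj/portafolios_inversion | src/portfolio_utils/PdfImageConverter.py | _normalize_pages
-- ===== SOURCE A (Python) =====
-- from typing import Literal, Sequence, cast
--
-- def _normalize_pages(pages: Sequence[int] | None, page_count: int) -> tuple[int, ...]:
--     if pages is None:
--         return tuple(range(1, page_count + 1))
--
--     valid_pages: list[int] = []
--     for page in pages:
--         if isinstance(page, bool) or not isinstance(page, int):
--             raise TypeError("pages must contain integers.")
--         if page < 1 or page > page_count:
--             raise ValueError(f"Page {page} is out of bounds. Valid range: 1..{page_count}")
--         valid_pages.append(page)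
--
--     unique_sorted = sorted(set(valid_pages))
--     if not unique_sorted:
--         raise ValueError("pages must contain at least one valid page number.")
--     return tuple(unique_sorted)
-- ===== SOURCE B (Python) =====
-- def _normalize_pages(pages, page_count):
--     if pages is None:
--         return tuple(range(1, page_count + 1))
--
--     out = []
--     for page in pages:
--         if isinstance(page, bool) or not isinstance(page, int):
--             raise TypeError("pages must contain integers.")
--         if page < 1 or page > page_count:
--             raise ValueError(f"Page {page} is out of bounds. Valid range: 1..{page_count}")
--         lo, hi = 0, len(out)
--         while lo < hi:
--             mid = (lo + hi) // 2
--             if out[mid] < page: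
--                 lo = mid + 1
--             else:
--                 hi = mid
--         if lo == len(out) or out[lo] != page:
--             out.insert(lo, page)
--
--     if not out:
--         raise ValueError("pages must contain at least one valid page number.")
--     return tuple(out)
-- ===== Notes on version B (the rewrite author's own statement) =====
-- stated objective: alternative
-- what changed: B never calls sort and never builds a set: inside the validation loop it maintains the sorted duplicate-free result incrementally, locating each page's position with a hand-rolled binary search and inserting it only if absent, instead of A's collect-then-sorted(set(...)).
import Mathlib
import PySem

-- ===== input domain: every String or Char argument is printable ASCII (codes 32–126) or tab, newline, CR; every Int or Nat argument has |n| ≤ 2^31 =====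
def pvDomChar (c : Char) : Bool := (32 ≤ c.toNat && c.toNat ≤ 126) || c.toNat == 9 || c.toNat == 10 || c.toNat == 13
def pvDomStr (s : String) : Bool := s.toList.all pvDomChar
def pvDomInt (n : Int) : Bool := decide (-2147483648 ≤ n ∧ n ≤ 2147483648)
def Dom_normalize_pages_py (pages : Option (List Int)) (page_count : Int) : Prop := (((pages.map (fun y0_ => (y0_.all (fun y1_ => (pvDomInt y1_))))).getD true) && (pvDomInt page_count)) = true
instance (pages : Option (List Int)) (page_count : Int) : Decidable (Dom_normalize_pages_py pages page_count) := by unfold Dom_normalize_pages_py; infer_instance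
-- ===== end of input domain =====

-- B replaces A's collect-then-sorted(set(...)) by an online algorithm: it maintains the sorted,
-- duplicate-free result during the validation loop itself, via a hand-written binary search + insert.

-- ===== PORT A =====
-- the loop 'for page in pages: … valid_pages.append(page)'; the raising branches are excluded by Pre_
def normalize_pages_py (pages : Option (List Int)) (page_count : Int) : List Int :=
  match pages with
  | none => PySem.List.pyRange 1 (page_count + 1) 1
  | some ps =>
      let valid_pages : List Int := ps.foldl (fun acc page => acc ++ [page]) []
      let unique_sorted := PySem.List.sorted (PySem.Set.ofList valid_pages) (fun x => x) false
      unique_sorted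

-- ===== PORT B =====
-- the 'while lo < hi' binary-search loop of Source B; out[mid] is always in range when called with
-- 0 ≤ lo ≤ hi ≤ len(out) (as Source B does), where pyGetD equals Python's out[mid]
def pvBisect (out : List Int) (page : Int) (lo hi : Int) : Int :=
  if h : lo < hi then
    let mid := PySem.Int.floordiv (lo + hi) 2
    if PySem.List.pyGetD out mid 0 < page then pvBisect out page (mid + 1) hi
    else pvBisect out page lo mid
  else lo
termination_by (hi - lo).toNat
decreasing_by
  · have h1 : lo ≤ PySem.Int.floordiv (lo + hi) 2 := by
      rw [PySem.Int.le_floordiv_iff_mul_le (by omega)]; omega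
    omega
  · have h2 : PySem.Int.floordiv (lo + hi) 2 < hi := by
      rw [PySem.Int.floordiv_lt_iff_lt_mul (by omega)]; omega
    omega

-- the body of Source B's validation loop: find page's position, insert it if absent
def pvStep (out : List Int) (page : Int) : List Int :=
  let lo := pvBisect out page 0 (out.length : Int)
  if lo = (out.length : Int) ∨ PySem.List.pyGetD out lo 0 ≠ page
  then PySem.List.insert out lo page
  else out

-- the validation loop of Source B, maintaining 'out' sorted and duplicate-free
def normalize_pages_py_alt (pages : Option (List Int)) (page_count : Int) : List Int :=
  match pages with
  | none => PySem.List.pyRange 1 (page_count + 1) 1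
  | some ps => ps.foldl pvStep []

-- ===== PRECONDITION & SPEC =====
-- Pre_ excludes exactly the inputs where A raises: a page outside 1..page_count (ValueError) or an empty pages list (ValueError).
def Pre_normalize_pages_py (pages : Option (List Int)) (page_count : Int) : Prop :=
  pages ≠ some [] ∧ ∀ p ∈ pages.getD [], 1 ≤ p ∧ p ≤ page_count
instance (pages : Option (List Int)) (page_count : Int) : Decidable (Pre_normalize_pages_py pages page_count) := by unfold Pre_normalize_pages_py; infer_instance

def pvWitness_normalize_pages_py : Option (List Int) × Int := (some [2, 1, 2], 3)

def Spec_normalize_pages_py (pages : Option (List Int)) (page_count : Int) (out : List Int) : Prop := out = normalize_pages_py_alt pages page_count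
instance (pages : Option (List Int)) (page_count : Int) (out : List Int) : Decidable (Spec_normalize_pages_py pages page_count out) := by unfold Spec_normalize_pages_py; infer_instance

-- ===== CLAIM (what is proved, stated in full; the proofs are below) =====
def Claim_equal_normalize_pages_py : Prop := ∀ (pages : Option (List Int)) (page_count : Int), Dom_normalize_pages_py pages page_count → Pre_normalize_pages_py pages page_count → Spec_normalize_pages_py pages page_count (normalize_pages_py pages page_count)

-- ===== LEMMAS AND PROOFS =====

theorem pv_foldl_append_id (ps : List Int) (acc : List Int) :
    ps.foldl (fun acc page => acc ++ [page]) acc = acc ++ ps := by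
  induction ps generalizing acc with
  | nil => simp
  | cons x xs ih => simp [List.foldl_cons, ih, List.append_assoc]

theorem pv_getElem_le (out : List Int) (h : out.Pairwise (· < ·)) (p q : Nat)
    (hpq : p ≤ q) (hq : q < out.length) : out[p]'(by omega) ≤ out[q] := by
  rcases Nat.lt_or_ge p q with hlt | hge
  · exact le_of_lt (List.pairwise_iff_getElem.mp h p q (by omega) hq hlt)
  · have : p = q := by omega
    subst this; exact le_refl _

-- binary-search correctness: pvBisect returns the first index whose element is ≥ page
theorem pvBisect_spec (out : List Int) (page : Int) (hs : out.Pairwise (· < ·)) :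
    ∀ (n : Nat) (lo hi : Int), (hi - lo).toNat = n → 0 ≤ lo → lo ≤ hi → hi ≤ (out.length : Int) →
    (∀ i : Int, 0 ≤ i → i < lo → PySem.List.pyGetD out i 0 < page) →
    (∀ i : Int, hi ≤ i → i < (out.length : Int) → ¬ PySem.List.pyGetD out i 0 < page) →
    lo ≤ pvBisect out page lo hi ∧ pvBisect out page lo hi ≤ hi ∧
    (∀ i : Int, 0 ≤ i → i < pvBisect out page lo hi → PySem.List.pyGetD out i 0 < page) ∧
    (∀ i : Int, pvBisect out page lo hi ≤ i → i < (out.length : Int) → ¬ PySem.List.pyGetD out i 0 < page) := by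
  intro n
  induction n using Nat.strong_induction_on with
  | _ n ih =>
    intro lo hi hn h0 hlh hhl Hlo Hhi
    rw [pvBisect]
    by_cases h : lo < hi
    · rw [dif_pos h]
      have hmlo : lo ≤ PySem.Int.floordiv (lo + hi) 2 := by
        rw [PySem.Int.le_floordiv_iff_mul_le (by omega)]; omega
      have hmhi : PySem.Int.floordiv (lo + hi) 2 < hi := by
        rw [PySem.Int.floordiv_lt_iff_lt_mul (by omega)]; omega
      set mid := PySem.Int.floordiv (lo + hi) 2 with hmid
      by_cases hc : PySem.List.pyGetD out mid 0 < page
      · rw [if_pos hc]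
        refine (ih (hi - (mid + 1)).toNat (by omega) (mid + 1) hi (by rfl) (by omega) (by omega) hhl ?_ Hhi).imp (by omega) id
        intro i h0i hilt
        by_cases hil : i < lo
        · exact Hlo i h0i hil
        · -- out[i] ≤ out[mid] < page by sortedness
          have h1 : i.toNat ≤ mid.toNat := by omega
          have h2 : mid.toNat < out.length := by omega
          have hle : out[i.toNat]'(by omega) ≤ out[mid.toNat] := pv_getElem_le out hs _ _ h1 h2
          rw [PySem.List.pyGetD_eq_getElem out 0 h0i (by omega)]
          rw [PySem.List.pyGetD_eq_getElem out 0 (by omega) (by omega)] at hc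
          exact lt_of_le_of_lt hle hc
      · rw [if_neg hc]
        refine (ih (mid - lo).toNat (by omega) lo mid (by rfl) h0 (by omega) (by omega) Hlo ?_).imp id (fun h => ⟨by omega, h.2⟩)
        intro i hmi hilt
        -- page ≤ out[mid] ≤ out[i] by sortedness
        have h2 : mid.toNat < out.length := by omega
        have h3 : i.toNat < out.length := by omega
        have hle : out[mid.toNat]'(h2) ≤ out[i.toNat] := pv_getElem_le out hs _ _ (by omega) h3
        rw [PySem.List.pyGetD_eq_getElem out 0 (by omega) (by omega)]
        rw [PySem.List.pyGetD_eq_getElem out 0 (by omega) (by omega)] at hc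
        exact fun hlt => hc (lt_of_le_of_lt hle hlt |>.trans_le (le_refl _)) |>.elim
    · rw [dif_neg h]
      have : lo = hi := by omega
      subst this
      exact ⟨le_refl _, le_refl _, Hlo, Hhi⟩

-- one step of Source B's loop preserves the invariant: out stays strictly sorted, members grow by page
theorem pv_step (out : List Int) (page : Int) (hp : out.Pairwise (· < ·)) :
    (pvStep out page).Pairwise (· < ·) ∧ ∀ x, x ∈ pvStep out page ↔ x ∈ out ∨ x = page := by
  obtain ⟨h1, h2, h3, h4⟩ := pvBisect_spec out page hp ((out.length : Int) - 0).toNat 0 (out.length : Int)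
    rfl le_rfl (by omega) le_rfl (by omega) (by omega)
  unfold pvStep
  set lo := pvBisect out page 0 (out.length : Int) with hlo
  have hmono : ∀ p q : Nat, (hpq : p < q) → (hq : q < out.length) → out[p]'(Nat.lt_trans hpq hq) < out[q] := by
    intro p q hpq hq
    exact List.pairwise_iff_getElem.mp hp _ _ (Nat.lt_trans hpq hq) hq hpq
  by_cases hend : lo = (out.length : Int)
  · -- insert at the end: out ++ [page]
    have hins : PySem.List.insert out lo page = out ++ [page] := by
      rw [hend]
      have : ((out.length : Nat) : Int) = (out.length : Int) := rfl
      rw [← this, PySem.List.insert_natCast out out.length page (le_refl _)]; simp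
    rw [if_pos (Or.inl hend), hins]
    constructor
    · rw [List.pairwise_append]
      refine ⟨hp, List.pairwise_singleton _ _, fun a ha b hb => ?_⟩
      simp only [List.mem_singleton] at hb; subst hb
      obtain ⟨k, hk, he⟩ := List.getElem_of_mem ha
      have := h3 (k : Int) (by omega) (by omega)
      rw [PySem.List.pyGetD_eq_getElem out 0 (by omega) (by omega)] at this
      rw [← he]; simpa using this
    · intro x; simp
  · have hlolen : lo.toNat < out.length := by omega
    have hge : ¬ out[lo.toNat] < page := by
      have := h4 lo le_rfl (by omega)
      rwa [PySem.List.pyGetD_eq_getElem out 0 (by omega) (by omega)] at this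
    by_cases heq : out[lo.toNat] = page
    · -- page already present: out unchanged
      have hcond : ¬ (lo = (out.length : Int) ∨ PySem.List.pyGetD out lo 0 ≠ page) := by
        push Not
        refine ⟨hend, ?_⟩
        rwa [PySem.List.pyGetD_eq_getElem out 0 (by omega) (by omega)]
      rw [if_neg hcond]
      refine ⟨hp, fun x => ⟨Or.inl, ?_⟩⟩
      rintro (hx | rfl)
      · exact hx
      · exact heq ▸ List.getElem_mem hlolen
    · -- page absent: insert at lo, i.e. take lo ++ page :: drop lo
      have hcond : (lo = (out.length : Int) ∨ PySem.List.pyGetD out lo 0 ≠ page) := by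
        refine Or.inr ?_
        rwa [PySem.List.pyGetD_eq_getElem out 0 (by omega) (by omega)]
      rw [if_pos hcond]
      have hloc : lo = ((lo.toNat : Nat) : Int) := by omega
      rw [hloc, PySem.List.insert_natCast out lo.toNat page (by omega)]
      have hgt : page < out[lo.toNat] := lt_of_le_of_ne (not_lt.mp hge) (fun h => heq h.symm)
      have hlt_take : ∀ a ∈ out.take lo.toNat, a < page := by
        intro a ha
        obtain ⟨k, hk, he⟩ := List.getElem_of_mem ha
        have hk' : k < lo.toNat := by have := (by simpa using hk : (k : Int) < lo ∧ k < out.length); omega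
        have := h3 (k : Int) (by omega) (by omega)
        rw [PySem.List.pyGetD_eq_getElem out 0 (by omega) (by omega)] at this
        rw [← he, List.getElem_take]
        simpa using this
      have hgt_drop : ∀ b ∈ out.drop lo.toNat, page < b := by
        intro b hb
        obtain ⟨k, hk, he⟩ := List.getElem_of_mem hb
        rw [← he, List.getElem_drop]
        rcases Nat.eq_zero_or_pos k with rfl | hkpos
        · simpa using hgt
        · exact hgt.trans (hmono lo.toNat (lo.toNat + k) (by omega) (by simp at hk; omega))
      constructor
      · rw [List.pairwise_append]
        refine ⟨hp.sublist (List.take_sublist _ _), ?_, ?_⟩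
        · rw [List.pairwise_cons]
          exact ⟨hgt_drop, hp.sublist (List.drop_sublist _ _)⟩
        · intro a ha b hb
          rcases List.mem_cons.mp hb with rfl | hb'
          · exact hlt_take a ha
          · calc a < page := hlt_take a ha
              _ < b := hgt_drop b hb'
      · intro x
        have htd : out.take lo.toNat ++ out.drop lo.toNat = out := List.take_append_drop _ _
        constructor
        · intro hx
          rcases List.mem_append.mp hx with hx' | hx'
          · exact Or.inl (htd ▸ List.mem_append.mpr (Or.inl hx'))
          · rcases List.mem_cons.mp hx' with rfl | hx''
            · exact Or.inr rfl
            · exact Or.inl (htd ▸ List.mem_append.mpr (Or.inr hx''))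
        · rintro (hx | rfl)
          · rcases List.mem_append.mp (htd ▸ hx) with hx' | hx'
            · exact List.mem_append.mpr (Or.inl hx')
            · exact List.mem_append.mpr (Or.inr (List.mem_cons.mpr (Or.inr hx')))
          · exact List.mem_append.mpr (Or.inr (List.mem_cons.mpr (Or.inl rfl)))

-- Source B's whole loop: the accumulator stays strictly sorted and collects exactly the pages seen
theorem pv_fold (ps : List Int) : ∀ (out : List Int), out.Pairwise (· < ·) →
    (ps.foldl pvStep out).Pairwise (· < ·)
    ∧ ∀ x, (x ∈ ps.foldl pvStep out ↔ x ∈ out ∨ x ∈ ps) := by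
  induction ps with
  | nil => intro out hp; exact ⟨hp, by simp⟩
  | cons p rest ih =>
      intro out hp
      simp only [List.foldl_cons]
      obtain ⟨hstep_p, hstep_m⟩ := pv_step out p hp
      obtain ⟨hh1, hh2⟩ := ih _ hstep_p
      refine ⟨hh1, fun x => ?_⟩
      rw [hh2, hstep_m]
      simp only [List.mem_cons]
      tauto

theorem pv_spec : ∀ (pages : Option (List Int)) (page_count : Int),
    Pre_normalize_pages_py pages page_count →
    normalize_pages_py pages page_count = normalize_pages_py_alt pages page_count := by
  intro pages pc _
  cases pages with
  | none => rfl
  | some ps =>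
      simp only [normalize_pages_py, normalize_pages_py_alt]
      rw [pv_foldl_append_id ps [], List.nil_append]
      obtain ⟨hfp, hfm⟩ := pv_fold ps [] (List.Pairwise.nil)
      apply PySem.List.sorted_eq_of_perm_of_pairwise_lt
      · rw [List.perm_ext_iff_of_nodup]
        · intro x
          rw [hfm, PySem.Set.mem_ofList]
          simp
        · exact hfp.nodup
        · exact PySem.Set.nodup_ofList ps
      · exact hfp

-- ===== VERDICT (by name: the statement is the Claim_ definition above) =====
theorem normalize_pages_py_spec : Claim_equal_normalize_pages_py := by
  intro pages pc _ hpre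
  exact pv_spec pages pc hpre
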